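-- pv_equiv track=rewrite | github.com/datakind/edvise | src/edvise/data_audit/genai/schema_mapping_agent/field_executor.py | _resolve_join_keys
-- ===== SOURCE A (Python) =====
-- def _resolve_join_keys(
--     canonical_keys: list[str],
--     table: str,
--     alias_map: dict[str, dict[str, str]],
-- ) -> list[str]:
--     """Map canonical join key names to actual DataFrame column names for a table."""
--     table_aliases = alias_map.get(table, {})
--     reverse = {v: k for k, v in table_aliases.items()}
--     return [reverse.get(k, k) for k in canonical_keys]
-- ===== SOURCE B (Python) =====
-- def _resolve_join_keys(
--     canonical_keys: list[str],
--     table: str,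
--     alias_map: dict[str, dict[str, str]],
-- ) -> list[str]:
--     """Map canonical join key names to actual DataFrame column names for a table."""
--     table_aliases = alias_map.get(table, {})
--     out = list(canonical_keys)
--     positions = {}
--     for i, k in enumerate(canonical_keys):
--         positions.setdefault(k, []).append(i)
--     for alias, canon in table_aliases.items():
--         for i in positions.get(canon, ()):
--             out[i] = alias
--     return out
-- ===== Notes on version B (the rewrite author's own statement) =====
-- stated objective: alternative
-- what changed: Instead of reversing the alias dict and mapping each key through it, B pre-fills the output with the keys, builds a key->positions index once, and makes one pass over the alias items writing each alias into all positions of its canonical value (later items overwrite, matching last-wins).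
import Mathlib
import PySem

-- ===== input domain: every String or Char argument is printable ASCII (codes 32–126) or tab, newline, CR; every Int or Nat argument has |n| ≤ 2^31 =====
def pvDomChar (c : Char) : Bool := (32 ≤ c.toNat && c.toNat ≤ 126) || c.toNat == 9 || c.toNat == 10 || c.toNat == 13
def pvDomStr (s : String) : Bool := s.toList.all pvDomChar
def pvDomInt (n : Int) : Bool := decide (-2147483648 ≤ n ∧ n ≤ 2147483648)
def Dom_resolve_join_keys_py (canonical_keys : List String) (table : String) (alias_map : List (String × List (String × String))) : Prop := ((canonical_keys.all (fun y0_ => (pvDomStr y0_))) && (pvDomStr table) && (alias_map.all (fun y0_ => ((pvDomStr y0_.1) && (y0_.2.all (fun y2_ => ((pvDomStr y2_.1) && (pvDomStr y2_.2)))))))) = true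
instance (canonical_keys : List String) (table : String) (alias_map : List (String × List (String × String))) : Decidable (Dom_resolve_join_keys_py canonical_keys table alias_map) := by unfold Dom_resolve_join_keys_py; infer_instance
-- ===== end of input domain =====

-- B drops A's reverse dictionary: it pre-fills the output with the keys, indexes key positions once,
-- then writes each alias into the positions of its canonical value in one pass (alternative, not faster).
-- ===== PORT A =====
def resolve_join_keys_py (canonical_keys : List String) (table : String) (alias_map : List (String × List (String × String))) : List String :=
  let table_aliases : List (String × String) := (PySem.Dict.mk alias_map).getD table []
  let reverse : PySem.Dict String String :=
    table_aliases.foldl (fun d p => d.insert p.2 p.1) PySem.Dict.empty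
  canonical_keys.map (fun k => reverse.getD k k)

-- ===== PORT B =====
def resolve_join_keys_py_alt (canonical_keys : List String) (table : String) (alias_map : List (String × List (String × String))) : List String :=
  let table_aliases : List (String × String) := (PySem.Dict.mk alias_map).getD table []
  let out0 : List String := canonical_keys
  let positions : PySem.Dict String (List Int) :=
    (PySem.List.enumerate canonical_keys 0).foldl
      (fun d p => d.modify p.2 [] (· ++ [p.1])) PySem.Dict.empty
  table_aliases.foldl
    (fun out p => (positions.getD p.2 []).foldl (fun out i => PySem.List.pySetD out i p.1) out) out0

-- ===== PRECONDITION & SPEC =====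
def Spec_resolve_join_keys_py (canonical_keys : List String) (table : String) (alias_map : List (String × List (String × String))) (out : List String) : Prop := out = resolve_join_keys_py_alt canonical_keys table alias_map
instance (canonical_keys : List String) (table : String) (alias_map : List (String × List (String × String))) (out : List String) : Decidable (Spec_resolve_join_keys_py canonical_keys table alias_map out) := by unfold Spec_resolve_join_keys_py; infer_instance

-- ===== CLAIM (what is proved, stated in full; the proofs are below) =====
def Claim_equal_resolve_join_keys_py : Prop := ∀ (canonical_keys : List String) (table : String) (alias_map : List (String × List (String × String))), Dom_resolve_join_keys_py canonical_keys table alias_map → Spec_resolve_join_keys_py canonical_keys table alias_map (resolve_join_keys_py canonical_keys table alias_map)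

-- ===== LEMMAS AND PROOFS =====

-- A's reverse-dict lookup equals a last-match fold over the alias items.
lemma getD_foldl_insert_swap (l : List (String × String)) (d : PySem.Dict String String) (k dflt : String) :
    (l.foldl (fun d p => d.insert p.2 p.1) d).getD k dflt
      = l.foldl (fun name p => if p.2 = k then p.1 else name) (d.getD k dflt) := by
  induction l generalizing d with
  | nil => rfl
  | cons p rest ih =>
      simp only [List.foldl_cons, ih, PySem.Dict.getD_insert]
      by_cases h : k = p.2
      · simp [h]
      · simp [h, Ne.symm h]

-- the positions index: getD c [] is the list of indices of c in keys
lemma positions_getD (keys : List String) (c : String) :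
    (((PySem.List.enumerate keys 0).foldl
        (fun d p => d.modify p.2 [] (· ++ [p.1])) PySem.Dict.empty : PySem.Dict String (List Int)).getD c [])
      = ((PySem.List.enumerate keys 0).filter (fun p => p.2 == c)).map (·.1) := by
  have h : (PySem.List.enumerate keys 0).foldl
        (fun d p => d.modify p.2 [] (· ++ [p.1])) (PySem.Dict.empty : PySem.Dict String (List Int))
      = ((PySem.List.enumerate keys 0).map Prod.swap).foldl
        (fun d q => d.modify q.1 [] (· ++ [q.2])) PySem.Dict.empty := by
    rw [List.foldl_map]; simp [Prod.swap]
  rw [h, PySem.Dict.getD_foldl_modify_append]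
  simp [List.filter_map, Function.comp_def, Prod.swap]

-- membership in the positions list of c
lemma mem_positions (keys : List String) (c : String) (j : Nat) (hj : j < keys.length) :
    ((j : Int) ∈ ((PySem.List.enumerate keys 0).filter (fun p => p.2 == c)).map (·.1))
      ↔ keys[j] = c := by
  simp only [List.mem_map, List.mem_filter, PySem.List.mem_enumerate_iff]
  constructor
  · rintro ⟨p, ⟨⟨k, hk, rfl⟩, hc⟩, h1⟩
    simp only [beq_iff_eq] at hc
    simp only [zero_add] at h1
    have : j = k := by exact_mod_cast h1.symm
    subst this; exact hc
  · intro hc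
    exact ⟨((0 : Int) + (j : Int), keys[j]), ⟨⟨j, hj, rfl⟩, by simp [hc]⟩, by simp⟩

-- every element of the positions list of c is a valid index
lemma mem_positions_range (keys : List String) (c : String) (i : Int)
    (h : i ∈ ((PySem.List.enumerate keys 0).filter (fun p => p.2 == c)).map (·.1)) :
    0 ≤ i ∧ i.toNat < keys.length := by
  simp only [List.mem_map, List.mem_filter, PySem.List.mem_enumerate_iff] at h
  obtain ⟨p, ⟨⟨k, hk, rfl⟩, _⟩, h1⟩ := h
  subst h1; simp; omega

-- inner write loop: length preserved
lemma length_foldl_pySetD (idxs : List Int) (out : List String) (v : String) :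
    (idxs.foldl (fun out i => PySem.List.pySetD out i v) out).length = out.length := by
  induction idxs generalizing out with
  | nil => rfl
  | cons i rest ih => simp [ih, PySem.List.length_pySetD]

-- inner write loop, pointwise: index j gets v iff j occurs in idxs
lemma getElem?_foldl_pySetD (idxs : List Int) (out : List String) (v : String) (j : Nat)
    (hall : ∀ i ∈ idxs, 0 ≤ i ∧ i.toNat < out.length) :
    (idxs.foldl (fun out i => PySem.List.pySetD out i v) out)[j]?
      = if (j : Int) ∈ idxs then (if j < out.length then some v else none) else out[j]? := by
  induction idxs generalizing out with
  | nil => simp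
  | cons i rest ih =>
      have hi := hall i (List.mem_cons_self ..)
      have hset : PySem.List.pySetD out i v = out.set i.toNat v :=
        PySem.List.pySetD_of_nonneg _ _ hi.1
      have hlen : (out.set i.toNat v).length = out.length := by simp
      rw [List.foldl_cons, hset, ih (out.set i.toNat v)
        (by intro x hx; rw [hlen]; exact hall x (List.mem_cons_of_mem _ hx)), hlen]
      by_cases hmem : (j : Int) ∈ rest
      · simp [hmem]
      · by_cases hji : (j : Int) = i
        · have : j = i.toNat := by omega
          subst this
          simp [hji, hi.2]
        · have hne : j ≠ i.toNat := by omega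
          simp [hmem, hji, Ne.symm hne]

-- outer write loop: length preserved
lemma length_foldl_writes (keys : List String) (l : List (String × String)) (out : List String) :
    (l.foldl (fun out p =>
        ((((PySem.List.enumerate keys 0).foldl
            (fun d p => d.modify p.2 [] (· ++ [p.1])) PySem.Dict.empty : PySem.Dict String (List Int)).getD p.2 []).foldl
          (fun out i => PySem.List.pySetD out i p.1) out)) out).length = out.length := by
  induction l generalizing out with
  | nil => rfl
  | cons p rest ih => rw [List.foldl_cons, ih, length_foldl_pySetD]

-- outer loop, pointwise: fold of multi-writes at index j equals the per-key last-match fold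
lemma getElem?_foldl_writes (keys : List String) (l : List (String × String)) (out : List String)
    (hlen : out.length = keys.length) (j : Nat) (hj : j < keys.length) :
    (l.foldl (fun out p =>
        ((((PySem.List.enumerate keys 0).foldl
            (fun d p => d.modify p.2 [] (· ++ [p.1])) PySem.Dict.empty : PySem.Dict String (List Int)).getD p.2 []).foldl
          (fun out i => PySem.List.pySetD out i p.1) out)) out)[j]?
      = Option.map (fun s => l.foldl (fun name p => if p.2 = keys[j] then p.1 else name) s) out[j]? := by
  induction l generalizing out with
  | nil => simp
  | cons p rest ih =>
      rw [List.foldl_cons]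
      set idxs := (((PySem.List.enumerate keys 0).foldl
            (fun d p => d.modify p.2 [] (· ++ [p.1])) PySem.Dict.empty : PySem.Dict String (List Int)).getD p.2 []) with hid
      have hidx : idxs = ((PySem.List.enumerate keys 0).filter (fun q => q.2 == p.2)).map (·.1) := by
        rw [hid, positions_getD]
      have hall : ∀ i ∈ idxs, 0 ≤ i ∧ i.toNat < out.length := by
        intro i hi; rw [hlen]; exact mem_positions_range keys p.2 i (hidx ▸ hi)
      have hlen' : (idxs.foldl (fun out i => PySem.List.pySetD out i p.1) out).length = keys.length := by
        rw [length_foldl_pySetD, hlen]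
      rw [ih _ hlen', getElem?_foldl_pySetD idxs out p.1 j hall]
      have hmem : ((j : Int) ∈ idxs) ↔ keys[j] = p.2 := by
        rw [hidx]; exact mem_positions keys p.2 j hj
      have hjlt : j < out.length := by omega
      by_cases hc : keys[j] = p.2
      · simp [hmem.mpr hc, hjlt, hc]
      · have h2 : ¬ ((j : Int) ∈ idxs) := fun h => hc (hmem.mp h)
        have hc' : p.2 ≠ keys[j] := fun h => hc h.symm
        simp [h2, hc']

-- ===== VERDICT (by name: the statement is the Claim_ definition above) =====
theorem resolve_join_keys_py_spec : Claim_equal_resolve_join_keys_py := by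
  intro canonical_keys table alias_map _
  unfold Spec_resolve_join_keys_py resolve_join_keys_py resolve_join_keys_py_alt
  simp only []
  apply List.ext_getElem?
  intro j
  by_cases hj : j < canonical_keys.length
  · rw [getElem?_foldl_writes canonical_keys _ canonical_keys rfl j hj,
      List.getElem?_map, List.getElem?_eq_getElem hj]
    simp [getD_foldl_insert_swap, PySem.Dict.getD_empty]
  · rw [List.getElem?_eq_none (by simp; omega),
      List.getElem?_eq_none (by rw [length_foldl_writes]; omega)]
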